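-- pv_equiv track=rewrite | github.com/masaki-sakata/EntityTree | scripts/train_lda_classifier.py | choose_label_from_edges
-- ===== SOURCE A (Python) =====
-- def choose_label_from_edges(edges: list, allowed: set) -> tuple[str | None, bool]:
--     if not edges: return None, False
--     first = edges[0].get("target_label")
--     if first in allowed: return first, False
--     for e in edges[1:]:
--         cand = e.get("target_label")
--         if cand in allowed: return cand, True
--     return None, False
-- ===== SOURCE B (Python) =====
-- def choose_label_from_edges(edges: list, allowed: set) -> tuple[str | None, bool]:
--     # Staged passes: materialize all labels, collect every matching index, select the minimum.
--     labels = [e.get("target_label") for e in edges]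
--     hits = [i for i, lab in enumerate(labels) if lab in allowed]
--     if not hits:
--         return None, False
--     i = min(hits)
--     return labels[i], i > 0
-- ===== Notes on version B (the rewrite author's own statement) =====
-- stated objective: alternative
-- what changed: Instead of A's short-circuiting scan with a special-cased first element, B runs staged total passes: it materializes the full label list, materializes the full list of matching indices, selects the minimum index, and derives both the label (by indexing back into the label list) and the flag (i > 0) from that index.
import Mathlib
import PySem

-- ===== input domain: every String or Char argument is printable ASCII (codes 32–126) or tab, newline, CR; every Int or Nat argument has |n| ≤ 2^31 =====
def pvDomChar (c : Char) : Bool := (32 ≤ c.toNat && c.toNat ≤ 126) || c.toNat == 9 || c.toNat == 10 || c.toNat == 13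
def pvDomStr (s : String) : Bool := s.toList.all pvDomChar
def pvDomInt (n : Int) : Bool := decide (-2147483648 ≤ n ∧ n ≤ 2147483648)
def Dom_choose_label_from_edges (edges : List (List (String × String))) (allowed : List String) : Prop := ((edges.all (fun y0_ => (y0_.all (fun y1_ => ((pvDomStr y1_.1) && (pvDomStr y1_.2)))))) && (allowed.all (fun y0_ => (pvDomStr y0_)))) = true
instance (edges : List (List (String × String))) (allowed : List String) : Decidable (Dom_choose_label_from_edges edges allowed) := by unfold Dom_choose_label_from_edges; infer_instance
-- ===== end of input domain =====

-- B replaces A's short-circuiting scan with a special-cased head by staged total passes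
-- (label list, list of all matching indices, minimum index), deriving label and flag from that index.


-- ===== PORT A =====
-- `cand in allowed` with cand an Option String (the .get may miss): None is never in a set of strings
def pvInAllowed (cand : Option String) (allowed : List String) : Bool :=
  match cand with
  | some s => allowed.contains s
  | none => false

-- the `for e in edges[1:]` loop of A
def pvALoop (rest : List (List (String × String))) (allowed : List String) : Option String × Bool :=
  match rest with
  | [] => (none, false)
  | e :: rest' =>
    let cand := (PySem.Dict.mk e).get? "target_label"
    if pvInAllowed cand allowed then (cand, true) else pvALoop rest' allowed

def choose_label_from_edges (edges : List (List (String × String))) (allowed : List String) : Option String × Bool :=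
  match edges with
  | [] => (none, false)
  | e0 :: rest =>
    let first := (PySem.Dict.mk e0).get? "target_label"
    if pvInAllowed first allowed then (first, false)
    else pvALoop rest allowed

-- ===== PORT B =====
-- Python's enumerate(xs) starting from index i
def pvEnum {α : Type} (i : Nat) : List α → List (Nat × α)
  | [] => []
  | a :: l => (i, a) :: pvEnum (i + 1) l

def choose_label_from_edges_alt (edges : List (List (String × String))) (allowed : List String) : Option String × Bool :=
  let labels := edges.map (fun e => (PySem.Dict.mk e).get? "target_label")
  let hits := ((pvEnum 0 labels).filter (fun p => pvInAllowed p.2 allowed)).map Prod.fst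
  match hits.min? with  -- min(hits), guarded by `if not hits` in Source B (min? none = empty)
  | none => (none, false)
  | some i => (labels.getD i none, decide (0 < i))
    -- labels[i]: i comes from enumerate(labels), hence a valid nonnegative index, so getD is exact

-- ===== PRECONDITION & SPEC =====
def Spec_choose_label_from_edges (edges : List (List (String × String))) (allowed : List String) (out : Option String × Bool) : Prop := out = choose_label_from_edges_alt edges allowed
instance (edges : List (List (String × String))) (allowed : List String) (out : Option String × Bool) : Decidable (Spec_choose_label_from_edges edges allowed out) := by unfold Spec_choose_label_from_edges; infer_instance

-- ===== CLAIM (what is proved, stated in full; the proofs are below) =====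
def Claim_equal_choose_label_from_edges : Prop := ∀ (edges : List (List (String × String))) (allowed : List String), Dom_choose_label_from_edges edges allowed → Spec_choose_label_from_edges edges allowed (choose_label_from_edges edges allowed)

-- ===== LEMMAS AND PROOFS =====

-- proof-side: first (index, label) of `labels` (counting from i) whose label is allowed
def pvFirstIdx (allowed : List String) (i : Nat) : List (Option String) → Option (Nat × Option String)
  | [] => none
  | l :: ls => if pvInAllowed l allowed then some (i, l) else pvFirstIdx allowed (i + 1) ls

-- B's hit list (indices counted from i), for reasoning
def pvHits (allowed : List String) (i : Nat) (labels : List (Option String)) : List Nat :=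
  ((pvEnum i labels).filter (fun p => pvInAllowed p.2 allowed)).map Prod.fst

theorem pvHits_ge (allowed : List String) (labels : List (Option String)) :
    ∀ i j, j ∈ pvHits allowed i labels → i ≤ j := by
  induction labels with
  | nil => intro i j h; simp [pvHits, pvEnum] at h
  | cons l ls ih =>
    intro i j h
    simp only [pvHits, pvEnum, List.filter_cons] at h
    by_cases hp : pvInAllowed l allowed = true
    · simp [hp] at h
      rcases h with h | h
      · omega
      · have := ih (i + 1) j (by simpa [pvHits] using h); omega
    · simp [hp] at h
      have := ih (i + 1) j (by simpa [pvHits] using h); omega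

theorem pvHits_min (allowed : List String) (labels : List (Option String)) :
    ∀ i, (pvHits allowed i labels).min? = (pvFirstIdx allowed i labels).map Prod.fst := by
  induction labels with
  | nil => intro i; simp [pvHits, pvEnum, pvFirstIdx]
  | cons l ls ih =>
    intro i
    by_cases hp : pvInAllowed l allowed = true
    · have hrest : ∀ j ∈ pvHits allowed (i + 1) ls, i ≤ j := by
        intro j hj; have := pvHits_ge allowed ls (i + 1) j hj; omega
      have expand : pvHits allowed i (l :: ls) = i :: pvHits allowed (i + 1) ls := by
        simp [pvHits, pvEnum, hp]
      rw [expand]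
      simp only [List.min?_cons, pvFirstIdx, hp, if_true, Option.map_some]
      cases hm : (pvHits allowed (i + 1) ls).min? with
      | none => simp
      | some m =>
        have hm' : m ∈ pvHits allowed (i + 1) ls :=
          List.min?_mem hm
        simp [Nat.min_eq_left (hrest m hm')]
    · simp only [pvHits, pvEnum, List.filter_cons, hp]
      simpa [pvFirstIdx, hp, pvHits] using ih (i + 1)

theorem pvFirstIdx_getD (allowed : List String) (labels : List (Option String)) :
    ∀ i j lab, pvFirstIdx allowed i labels = some (j, lab) →
      i ≤ j ∧ labels.getD (j - i) none = lab := by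
  induction labels with
  | nil => intro i j lab h; simp [pvFirstIdx] at h
  | cons l ls ih =>
    intro i j lab h
    by_cases hp : pvInAllowed l allowed = true
    · simp [pvFirstIdx, hp] at h
      obtain ⟨h1, h2⟩ := h
      subst h1; subst h2; simp
    · simp [pvFirstIdx, hp] at h
      obtain ⟨hle, hget⟩ := ih (i + 1) j lab h
      refine ⟨by omega, ?_⟩
      have : j - i = (j - (i + 1)) + 1 := by omega
      simpa [this] using hget

-- A's tail loop agrees with pvFirstIdx over the mapped labels (flag true, since index ≥ 1 > 0)
theorem pvALoop_firstIdx (allowed : List String) (rest : List (List (String × String))) :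
    ∀ i, pvALoop rest allowed =
      (match pvFirstIdx allowed (i + 1) (rest.map (fun e => (PySem.Dict.mk e).get? "target_label")) with
        | none => ((none : Option String), false)
        | some (_, lab) => (lab, true)) := by
  induction rest with
  | nil => intro i; simp [pvALoop, pvFirstIdx]
  | cons e rest' ih =>
    intro i
    simp only [pvALoop, List.map_cons, pvFirstIdx]
    by_cases hp : pvInAllowed ((PySem.Dict.mk e).get? "target_label") allowed = true
    · simp [hp]
    · rw [if_neg hp, if_neg hp]; exact ih (i + 1)

-- ===== VERDICT (by name: the statement is the Claim_ definition above) =====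
theorem choose_label_from_edges_spec : Claim_equal_choose_label_from_edges := by
  intro edges allowed _
  unfold Spec_choose_label_from_edges
  show choose_label_from_edges edges allowed =
    (match (pvHits allowed 0 (edges.map (fun e => (PySem.Dict.mk e).get? "target_label"))).min? with
      | none => ((none : Option String), false)
      | some i => ((edges.map (fun e => (PySem.Dict.mk e).get? "target_label")).getD i none, decide (0 < i)))
  rw [pvHits_min]
  cases edges with
  | nil => simp [choose_label_from_edges, pvFirstIdx]
  | cons e0 rest =>
    simp only [choose_label_from_edges, List.map_cons, pvFirstIdx]
    by_cases hp : pvInAllowed ((PySem.Dict.mk e0).get? "target_label") allowed = true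
    · simp [hp]
    · rw [if_neg hp, if_neg hp]
      rw [pvALoop_firstIdx allowed rest 0]
      cases hfi : pvFirstIdx allowed 1 (rest.map (fun e => (PySem.Dict.mk e).get? "target_label")) with
      | none => simp
      | some p =>
        obtain ⟨j, lab⟩ := p
        obtain ⟨hle, hget⟩ := pvFirstIdx_getD allowed _ 1 j lab hfi
        have hj : 0 < j := by omega
        have : (((PySem.Dict.mk e0).get? "target_label") ::
            rest.map (fun e => (PySem.Dict.mk e).get? "target_label")).getD j none = lab := by
          have hjj : j = (j - 1) + 1 := by omega
          rw [hjj]; simpa using hget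
        have hdj : decide (0 < j) = true := decide_eq_true hj
        simp only [Option.map_some]
        rw [this, hdj]
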